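-- pv_equiv track=rewrite | github.com/fuhaigao/leetcode | 395.Longest_Substring_with_At_Least_K_Repeating_Characters.py | findLongestDistinct
-- ===== SOURCE A (Python) =====
-- def findLongestDistinct(s, k, numDistinct):
--     begin, end = 0, 0
--     uniqueNum, noLessThanKNum = 0, 0
--     count = {}
--     max_length = 0
--     # Two pointer sliding window
--     while end < len(s):
--         cEnd = s[end]
--         count[cEnd] = count.get(cEnd, 0) + 1
--         if count[cEnd] == 1:
--             uniqueNum += 1
--         if count[cEnd] == k:
--             noLessThanKNum += 1
--         end += 1
--
--         while uniqueNum > numDistinct: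
--             cBegin = s[begin]
--             if count[cBegin] == 1:
--                 uniqueNum -= 1
--             if count[cBegin] == k:
--                 noLessThanKNum -= 1
--             count[cBegin] = count[cBegin] - 1
--             begin += 1
--         if uniqueNum == noLessThanKNum:
--             max_length = max(max_length, end-begin)
--     return max_length
-- ===== SOURCE B (Python) =====
-- def findLongestDistinct(s, k, numDistinct):
--     # Per-end brute force: for each end j, rebuild the longest window ending at j
--     # with at most numDistinct distinct characters by a fresh backward scan, then
--     # check every character in it occurs at least k times. No sliding state.
--     best = 0
--     for j in range(1, len(s) + 1):
--         cnt = {}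
--         b = j
--         while b > 0 and (s[b - 1] in cnt or len(cnt) < numDistinct):
--             c = s[b - 1]
--             cnt[c] = cnt.get(c, 0) + 1
--             b -= 1
--         if all(v >= k for v in cnt.values()):
--             best = max(best, j - b)
--     return best
-- ===== Notes on version B (the rewrite author's own statement) =====
-- stated objective: alternative
-- what changed: Replaces the incremental two-pointer sliding window (running begin pointer, one shared count dict, unique/at-least-k counters maintained by ==1/==k transitions) with an independent per-end brute force: for every end index a fresh backward scan rebuilds the maximal at-most-numDistinct window ending there and the every-char-at-least-k test is recomputed from its own counter.
-- outside the precondition, e.g. on findLongestDistinct('ab', 0, 1): A returns 0, B returns 1; on findLongestDistinct('ab', 1, -1): A raises KeyError, B returns 0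
import Mathlib
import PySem

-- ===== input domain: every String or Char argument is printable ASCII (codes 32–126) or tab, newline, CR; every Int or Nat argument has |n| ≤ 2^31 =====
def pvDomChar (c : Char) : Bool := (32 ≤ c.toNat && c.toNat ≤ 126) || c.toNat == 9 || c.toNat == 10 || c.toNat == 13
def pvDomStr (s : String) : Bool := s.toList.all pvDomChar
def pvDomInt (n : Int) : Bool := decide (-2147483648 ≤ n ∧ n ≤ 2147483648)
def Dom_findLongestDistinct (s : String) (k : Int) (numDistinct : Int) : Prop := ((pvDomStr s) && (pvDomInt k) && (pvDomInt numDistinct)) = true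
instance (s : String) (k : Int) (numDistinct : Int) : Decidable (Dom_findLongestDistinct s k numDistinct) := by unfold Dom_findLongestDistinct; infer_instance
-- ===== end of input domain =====

-- B replaces A's incremental two-pointer sliding window by an independent per-end
-- backward rebuild of each window (alternative decomposition, not faster).

-- ===== PORT A =====
-- A's inner `while uniqueNum > numDistinct` loop, fuel-bounded (the fuel passed is
-- always enough inside Pre_; the `none` branch is Python's IndexError, outside Pre_).
def pvAShrink (t : List Char) (k nd : Int) :
    Nat → Int × Int × Int × PySem.Dict Char Int → Int × Int × Int × PySem.Dict Char Int
  | 0, st => st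
  | fuel + 1, (beg, uniq, noK, cnt) =>
    if uniq > nd then
      match PySem.List.pyGet? t beg with
      | none => (beg, uniq, noK, cnt)
      | some cBegin =>
        let cb := cnt.getD cBegin 0   -- Python's count[cBegin]; the key is present whenever this is reached inside Pre_
        pvAShrink t k nd fuel
          (beg + 1, (if cb == 1 then uniq - 1 else uniq), (if cb == k then noK - 1 else noK),
           cnt.insert cBegin (cb - 1))
    else (beg, uniq, noK, cnt)

-- one iteration of A's outer `while end < len(s)` loop, for end = i
def pvAStep (t : List Char) (k nd : Int)
    (st : Int × Int × Int × PySem.Dict Char Int × Int) (i : Nat) :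
    Int × Int × Int × PySem.Dict Char Int × Int :=
  match PySem.List.pyGet? t (i : Int) with
  | none => st   -- unreachable: i < len(t)
  | some cEnd =>
    match st with
    | (beg, uniq, noK, cnt, maxLen) =>
      let newc := cnt.getD cEnd 0 + 1
      let uniq1 := if newc == 1 then uniq + 1 else uniq
      let noK1 := if newc == k then noK + 1 else noK
      match pvAShrink t k nd (t.length + 1) (beg, uniq1, noK1, cnt.insert cEnd newc) with
      | (beg2, uniq2, noK2, cnt2) =>
        (beg2, uniq2, noK2, cnt2,
         if uniq2 == noK2 then max maxLen ((i : Int) + 1 - beg2) else maxLen)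

def findLongestDistinct (s : String) (k : Int) (numDistinct : Int) : Int :=
  ((List.range s.toList.length).foldl (pvAStep s.toList k numDistinct)
    (0, 0, 0, PySem.Dict.empty, 0)).2.2.2.2

-- ===== PORT B =====
-- B's backward `while b > 0 and (s[b-1] in cnt or len(cnt) < numDistinct)` scan;
-- the first argument list is the reversed prefix s[:b], b tracks Python's b.
def pvBScan (nd : Int) : List Char → PySem.Dict Char Int → Nat → PySem.Dict Char Int × Nat
  | [], cnt, b => (cnt, b)
  | c :: rest, cnt, b =>
    if cnt.contains c || decide ((cnt.size : Int) < nd) then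
      pvBScan nd rest (cnt.insert c (cnt.getD c 0 + 1)) (b - 1)
    else (cnt, b)

-- one iteration of B's `for j in range(1, len(s)+1)` loop
def pvBBody (t : List Char) (k nd : Int) (best : Int) (j : Int) : Int :=
  match pvBScan nd ((t.take j.toNat).reverse) PySem.Dict.empty j.toNat with
  | (cnt, b) =>
    if cnt.values.all (fun v => decide (k ≤ v)) then max best (j - (b : Int)) else best

def findLongestDistinct_alt (s : String) (k : Int) (numDistinct : Int) : Int :=
  (PySem.List.pyRange 1 ((s.toList.length : Int) + 1) 1).foldl (pvBBody s.toList k numDistinct) 0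

-- ===== PRECONDITION & SPEC =====
-- Pre_ restricts to the problem's natural domain (s may be anything): numDistinct < 0 makes A
-- raise KeyError/IndexError on any nonempty s, and a repetition threshold k ≤ 0 is outside the
-- task's natural domain — there A's ==k transition counters let no window qualify (A returns 0)
-- while the literal every-count-≥-k reading is vacuously true (B returns the longest window);
-- both readings are defensible for a nonpositive threshold.  The empty string is always admitted.
def Pre_findLongestDistinct (s : String) (k : Int) (numDistinct : Int) : Prop :=
  s = "" ∨ (1 ≤ k ∧ 0 ≤ numDistinct)
instance (s : String) (k : Int) (numDistinct : Int) : Decidable (Pre_findLongestDistinct s k numDistinct) := by unfold Pre_findLongestDistinct; infer_instance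
def pvWitness_findLongestDistinct : String × Int × Int := ("aabbc", 2, 2)

def Spec_findLongestDistinct (s : String) (k : Int) (numDistinct : Int) (out : Int) : Prop := out = findLongestDistinct_alt s k numDistinct
instance (s : String) (k : Int) (numDistinct : Int) (out : Int) : Decidable (Spec_findLongestDistinct s k numDistinct out) := by unfold Spec_findLongestDistinct; infer_instance

-- ===== CLAIM (what is proved, stated in full; the proofs are below) =====
def Claim_equal_findLongestDistinct : Prop := ∀ (s : String) (k : Int) (numDistinct : Int), Dom_findLongestDistinct s k numDistinct → Pre_findLongestDistinct s k numDistinct → Spec_findLongestDistinct s k numDistinct (findLongestDistinct s k numDistinct)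

-- ===== LEMMAS AND PROOFS =====

-- the window s[b:e] (as a list), its number of distinct characters, and the number of its
-- distinct characters occurring at least k times
def pvSeg (t : List Char) (b e : Nat) : List Char := (t.take e).drop b
def pvDis (w : List Char) : Nat := w.toFinset.card
def pvNok (k : Int) (w : List Char) : Nat :=
  (w.toFinset.filter (fun c => k ≤ (w.count c : Int))).card

def pvAFold (t : List Char) (k nd : Int) (e : Nat) :
    Int × Int × Int × PySem.Dict Char Int × Int :=
  (List.range e).foldl (pvAStep t k nd) (0, 0, 0, PySem.Dict.empty, 0)
def pvBFold (t : List Char) (k nd : Int) (e : Nat) : Int :=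
  (PySem.List.pyRange 1 ((e : Int) + 1) 1).foldl (pvBBody t k nd) 0

-- basic window algebra
lemma pvSeg_self (t : List Char) (e : Nat) : pvSeg t e e = [] := by
  apply List.drop_eq_nil_of_le; simp

lemma pvSeg_push {t : List Char} {b e : Nat} (hb : b ≤ e) (he : e < t.length) :
    pvSeg t b (e + 1) = pvSeg t b e ++ [t[e]] := by
  unfold pvSeg
  rw [List.take_succ_eq_append_getElem he, List.drop_append_of_le_length (by simp; omega)]

lemma pvSeg_pop {t : List Char} {b j : Nat} (hbj : b < j) (hj : j ≤ t.length) :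
    pvSeg t b j = t[b]'(by omega) :: pvSeg t (b + 1) j := by
  unfold pvSeg
  rw [List.drop_eq_getElem_cons (by simp; omega)]
  congr 1
  exact List.getElem_take

lemma pvDis_mono (t : List Char) {b b' : Nat} (e : Nat) (h : b ≤ b') :
    pvDis (pvSeg t b' e) ≤ pvDis (pvSeg t b e) := by
  have hseg : pvSeg t b' e = (pvSeg t b e).drop (b' - b) := by
    unfold pvSeg; rw [List.drop_drop]; congr 1; omega
  rw [hseg]
  apply Finset.card_le_card
  intro c hc
  exact List.mem_toFinset.mpr ((List.drop_sublist _ _).subset (List.mem_toFinset.mp hc))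

lemma pvDis_cons (c : Char) (w : List Char) :
    pvDis (c :: w) = if c ∈ w then pvDis w else pvDis w + 1 := by
  unfold pvDis
  rw [List.toFinset_cons]
  split_ifs with h
  · rw [Finset.card_insert_of_mem (List.mem_toFinset.mpr h)]
  · rw [Finset.card_insert_of_notMem (by simpa using h)]

lemma count_cons' (c x : Char) (w : List Char) :
    (c :: w).count x = w.count x + (if x = c then 1 else 0) := by
  rcases eq_or_ne x c with rfl | h
  · simp
  · simp [Ne.symm h, h]

lemma mem_of_count_ge {k : Int} (hk : 1 ≤ k) {w : List Char} {c : Char}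
    (h : k ≤ (w.count c : Int)) : c ∈ w :=
  List.one_le_count_iff.mp (by exact_mod_cast le_trans hk h)

lemma pvNok_cons {k : Int} (hk : 1 ≤ k) (c : Char) (w : List Char) :
    pvNok k (c :: w) = if (w.count c : Int) + 1 = k then pvNok k w + 1 else pvNok k w := by
  unfold pvNok
  split_ifs with hck
  · have hset : (c :: w).toFinset.filter (fun x => k ≤ ((c :: w).count x : Int))
        = insert c (w.toFinset.filter (fun x => k ≤ (w.count x : Int))) := by
      ext x
      simp only [List.toFinset_cons, Finset.mem_filter, Finset.mem_insert, List.mem_toFinset,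
        count_cons']
      rcases eq_or_ne x c with rfl | hx
      · simp only [true_or]
        constructor
        · intro _; trivial
        · intro _; exact ⟨trivial, by push_cast; omega⟩
      · simp only [if_neg hx, add_zero]
        constructor
        · rintro ⟨h1 | h1, h2⟩
          · exact absurd h1 hx
          · exact Or.inr ⟨h1, h2⟩
        · rintro (h1 | ⟨h1, h2⟩)
          · exact absurd h1 hx
          · exact ⟨Or.inr h1, h2⟩
    rw [hset, Finset.card_insert_of_notMem]
    simp only [Finset.mem_filter, List.mem_toFinset, not_and]
    intro _
    omega
  · have hset : (c :: w).toFinset.filter (fun x => k ≤ ((c :: w).count x : Int))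
        = w.toFinset.filter (fun x => k ≤ (w.count x : Int)) := by
      ext x
      simp only [List.toFinset_cons, Finset.mem_filter, Finset.mem_insert, List.mem_toFinset,
        count_cons']
      rcases eq_or_ne x c with rfl | hx
      · simp only [true_or]
        push_cast
        constructor
        · rintro ⟨-, h2⟩
          have hcw : k ≤ (w.count x : Int) := by omega
          exact ⟨mem_of_count_ge hk hcw, hcw⟩
        · rintro ⟨h1, h2⟩
          exact ⟨trivial, by omega⟩
      · simp only [if_neg hx, add_zero]
        constructor
        · rintro ⟨h1 | h1, h2⟩
          · exact absurd h1 hx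
          · exact ⟨h1, h2⟩
        · rintro ⟨h1, h2⟩
          exact ⟨Or.inr h1, h2⟩
    rw [hset]

lemma pvNok_perm {k : Int} {w w' : List Char} (h : w.Perm w') : pvNok k w = pvNok k w' := by
  unfold pvNok
  rw [List.toFinset_eq_of_perm _ _ h]
  congr 1
  apply Finset.filter_congr
  intro x _
  rw [h.count x]

lemma pvNok_eq_dis_iff (k : Int) (w : List Char) :
    pvNok k w = pvDis w ↔ ∀ c ∈ w, k ≤ (w.count c : Int) := by
  unfold pvNok pvDis
  constructor
  · intro h c hc
    exact Finset.filter_card_eq h c (List.mem_toFinset.mpr hc)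
  · intro h
    rw [Finset.filter_true_of_mem (fun c hc => h c (List.mem_toFinset.mp hc))]

lemma pvDictCard {d : PySem.Dict Char Int} {w : List Char}
    (hnd : d.keys.Nodup) (hmem : ∀ c, d.contains c = true ↔ c ∈ w) :
    d.size = pvDis w := by
  have hsize : d.size = d.keys.length := by
    simp [PySem.Dict.size, PySem.Dict.keys]
  have hfin : d.keys.toFinset = w.toFinset := by
    ext c
    rw [List.mem_toFinset, List.mem_toFinset, ← PySem.Dict.contains_iff_mem_keys, hmem]
  rw [hsize, ← List.toFinset_card_of_nodup hnd, hfin]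
  rfl

lemma pvDictAll {k : Int} {d : PySem.Dict Char Int} {w : List Char}
    (hnd : d.keys.Nodup) (hmem : ∀ c, d.contains c = true ↔ c ∈ w)
    (hcnt : ∀ c, d.getD c 0 = (w.count c : Int)) :
    (d.values.all (fun v => decide (k ≤ v))) = true ↔ ∀ c ∈ w, k ≤ (w.count c : Int) := by
  rw [PySem.Dict.values_eq_map_keys d hnd 0, List.all_map, List.all_eq_true]
  constructor
  · intro h c hc
    have hck : c ∈ d.keys := (PySem.Dict.contains_iff_mem_keys d c).mp ((hmem c).mpr hc)
    have := h c hck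
    simp only [Function.comp] at this
    have h2 := of_decide_eq_true this
    rwa [hcnt c] at h2
  · intro h c hc
    have hcw : c ∈ w := (hmem c).mp ((PySem.Dict.contains_iff_mem_keys d c).mpr hc)
    simp only [Function.comp]
    exact decide_eq_true (by rw [hcnt c]; exact h c hcw)

lemma pvDis_perm {w w' : List Char} (h : w.Perm w') : pvDis w = pvDis w' := by
  unfold pvDis; rw [List.toFinset_eq_of_perm _ _ h]

lemma pvDis_snoc (c : Char) (w : List Char) :
    pvDis (w ++ [c]) = if c ∈ w then pvDis w else pvDis w + 1 := by
  rw [pvDis_perm (List.perm_append_singleton c w), pvDis_cons]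

lemma pvNok_snoc {k : Int} (hk : 1 ≤ k) (c : Char) (w : List Char) :
    pvNok k (w ++ [c]) = if (w.count c : Int) + 1 = k then pvNok k w + 1 else pvNok k w := by
  rw [pvNok_perm (List.perm_append_singleton c w), pvNok_cons hk]

lemma count_snoc (c x : Char) (w : List Char) :
    (w ++ [c]).count x = w.count x + (if x = c then 1 else 0) := by
  rcases eq_or_ne x c with rfl | h
  · simp
  · simp [List.count_append, Ne.symm h, h]

lemma take_reverse_cons {t : List Char} {b : Nat} (h : b < t.length) :
    (t.take (b + 1)).reverse = t[b]'h :: (t.take b).reverse := by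
  rw [List.take_succ_eq_append_getElem h, List.reverse_append]
  rfl

lemma pvShrink_ok (t : List Char) (k nd : Int) (hk : 1 ≤ k) (hnd : 0 ≤ nd)
    (e : Nat) (he : e ≤ t.length) :
    ∀ fuel b cnt, b ≤ e → e - b ≤ fuel →
      (∀ c, cnt.getD c 0 = ((pvSeg t b e).count c : Int)) →
      (∀ b' : Nat, b' < b → nd < (pvDis (pvSeg t b' e) : Int)) →
      ∃ (b2 : Nat) (cnt2 : PySem.Dict Char Int),
        pvAShrink t k nd fuel
          ((b : Int), (pvDis (pvSeg t b e) : Int), (pvNok k (pvSeg t b e) : Int), cnt)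
          = ((b2 : Int), (pvDis (pvSeg t b2 e) : Int), (pvNok k (pvSeg t b2 e) : Int), cnt2)
        ∧ b ≤ b2 ∧ b2 ≤ e
        ∧ (∀ c, cnt2.getD c 0 = ((pvSeg t b2 e).count c : Int))
        ∧ (pvDis (pvSeg t b2 e) : Int) ≤ nd
        ∧ (∀ b' : Nat, b' < b2 → nd < (pvDis (pvSeg t b' e) : Int)) := by
  intro fuel
  induction fuel with
  | zero =>
    intro b cnt hbe hfuel hcnt hmin
    have hb : b = e := by omega
    subst hb
    refine ⟨b, cnt, rfl, le_rfl, le_rfl, hcnt, ?_, hmin⟩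
    rw [pvSeg_self]
    simpa [pvDis] using hnd
  | succ fuel ih =>
    intro b cnt hbe hfuel hcnt hmin
    by_cases hgt : ((pvDis (pvSeg t b e) : Int)) > nd
    · -- window too wide: pop s[b]
      have hbe' : b < e := by
        rcases Nat.lt_or_ge b e with h | h
        · exact h
        · exfalso
          have : b = e := by omega
          subst this
          rw [pvSeg_self] at hgt
          simp [pvDis] at hgt
          omega
      have hblen : b < t.length := by omega
      set c := t[b]'hblen with hc
      have hseg : pvSeg t b e = c :: pvSeg t (b + 1) e := pvSeg_pop hbe' he
      set w' := pvSeg t (b + 1) e with hw'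
      have hget : PySem.List.pyGet? t ((b : Nat) : Int) = some c := by
        rw [PySem.List.pyGet?_natCast, List.getElem?_eq_getElem hblen]
      have hcb : cnt.getD c 0 = ((w'.count c : Int)) + 1 := by
        rw [hcnt c, hseg]
        push_cast [count_cons']
        simp
      -- unfold one step
      rw [show pvAShrink t k nd (fuel + 1)
            ((b : Int), (pvDis (pvSeg t b e) : Int), (pvNok k (pvSeg t b e) : Int), cnt)
          = pvAShrink t k nd fuel
            ((b : Int) + 1,
             (if cnt.getD c 0 == 1 then (pvDis (pvSeg t b e) : Int) - 1 else (pvDis (pvSeg t b e) : Int)),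
             (if cnt.getD c 0 == k then (pvNok k (pvSeg t b e) : Int) - 1 else (pvNok k (pvSeg t b e) : Int)),
             cnt.insert c (cnt.getD c 0 - 1)) from by
        simp only [pvAShrink]
        rw [if_pos (by exact_mod_cast hgt), hget]]
      have huniq : (if cnt.getD c 0 == 1 then (pvDis (pvSeg t b e) : Int) - 1 else (pvDis (pvSeg t b e) : Int))
          = (pvDis w' : Int) := by
        rw [hcb, hseg, pvDis_cons]
        by_cases hcw : c ∈ w'
        · have h1 : 1 ≤ w'.count c := List.one_le_count_iff.mpr hcw
          rw [if_neg (by simp; omega), if_pos hcw]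
        · have h0 : w'.count c = 0 := List.count_eq_zero.mpr hcw
          rw [if_pos (by simp [h0]), if_neg hcw]
          push_cast
          ring
      have hnok : (if cnt.getD c 0 == k then (pvNok k (pvSeg t b e) : Int) - 1 else (pvNok k (pvSeg t b e) : Int))
          = (pvNok k w' : Int) := by
        rw [hcb, hseg, pvNok_cons hk]
        by_cases hck : ((w'.count c : Int)) + 1 = k
        · rw [if_pos (by simp [hck]), if_pos hck]
          push_cast
          ring
        · rw [if_neg (by simp [hck]), if_neg hck]
      have hcnt' : ∀ x, (cnt.insert c (cnt.getD c 0 - 1)).getD x 0 = ((w'.count x : Int)) := by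
        intro x
        rw [PySem.Dict.getD_insert]
        rcases eq_or_ne x c with rfl | hx
        · rw [if_pos rfl, hcb]; ring
        · rw [if_neg hx, hcnt x, hseg]
          push_cast [count_cons']
          simp [hx]
      have hmin' : ∀ b' : Nat, b' < b + 1 → nd < (pvDis (pvSeg t b' e) : Int) := by
        intro b' hb'
        rcases Nat.lt_or_ge b' b with h | h
        · exact hmin b' h
        · have : b' = b := by omega
          subst this
          exact hgt
      rw [huniq, hnok]
      have hcast : ((b : Int) + 1) = (((b + 1 : Nat)) : Int) := by push_cast; ring
      rw [hcast]
      obtain ⟨b2, cnt2, heq, hb2l, hb2r, hc2, hd2, hm2⟩ :=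
        ih (b + 1) (cnt.insert c (cnt.getD c 0 - 1)) (by omega) (by omega) hcnt' hmin'
      exact ⟨b2, cnt2, heq, by omega, hb2r, hc2, hd2, hm2⟩
    · -- window fine: loop exits
      refine ⟨b, cnt, ?_, le_rfl, hbe, hcnt, by omega, hmin⟩
      simp only [pvAShrink]
      rw [if_neg (by exact_mod_cast hgt)]

lemma pvBScan_ok (t : List Char) (nd : Int) (_hnd : 0 ≤ nd) (j : Nat) (hj : j ≤ t.length) :
    ∀ b cnt, b ≤ j →
      (∀ c, cnt.getD c 0 = ((pvSeg t b j).count c : Int)) →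
      (∀ c, cnt.contains c = true ↔ c ∈ pvSeg t b j) →
      cnt.keys.Nodup →
      (pvDis (pvSeg t b j) : Int) ≤ nd →
      ∃ (cnt2 : PySem.Dict Char Int) (b2 : Nat),
        pvBScan nd ((t.take b).reverse) cnt b = (cnt2, b2)
        ∧ b2 ≤ b
        ∧ (∀ c, cnt2.getD c 0 = ((pvSeg t b2 j).count c : Int))
        ∧ (∀ c, cnt2.contains c = true ↔ c ∈ pvSeg t b2 j)
        ∧ cnt2.keys.Nodup
        ∧ (pvDis (pvSeg t b2 j) : Int) ≤ nd
        ∧ (∀ b' : Nat, b' < b2 → nd < (pvDis (pvSeg t b' j) : Int)) := by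
  intro b
  induction b with
  | zero =>
    intro cnt _ hcnt hmem hnodup hdis
    exact ⟨cnt, 0, by simp [pvBScan], le_rfl, hcnt, hmem, hnodup, hdis, by omega⟩
  | succ b ih =>
    intro cnt hbj hcnt hmem hnodup hdis
    have hblen : b < t.length := by omega
    set c := t[b]'hblen with hc
    have hseg : pvSeg t b j = c :: pvSeg t (b + 1) j := pvSeg_pop (by omega) hj
    set w := pvSeg t (b + 1) j with hw
    rw [take_reverse_cons hblen]
    by_cases hg : (cnt.contains c || decide ((cnt.size : Int) < nd)) = true
    · -- extend the window by c
      have hstep : pvBScan nd (c :: (t.take b).reverse) cnt (b + 1)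
          = pvBScan nd ((t.take b).reverse) (cnt.insert c (cnt.getD c 0 + 1)) b := by
        simp only [pvBScan]
        rw [if_pos hg, Nat.add_sub_cancel]
      have hcnt' : ∀ x, (cnt.insert c (cnt.getD c 0 + 1)).getD x 0 = ((pvSeg t b j).count x : Int) := by
        intro x
        rw [PySem.Dict.getD_insert]
        rcases eq_or_ne x c with rfl | hx
        · rw [if_pos rfl, hcnt c, hseg]
          push_cast [count_cons']
          simp
        · rw [if_neg hx, hcnt x, hseg]
          push_cast [count_cons']
          simp [hx]
      have hmem' : ∀ x, (cnt.insert c (cnt.getD c 0 + 1)).contains x = true ↔ x ∈ pvSeg t b j := by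
        intro x
        rw [PySem.Dict.contains_insert, hseg]
        simp only [Bool.or_eq_true, beq_iff_eq, List.mem_cons]
        rw [hmem x]
      have hnodup' : (cnt.insert c (cnt.getD c 0 + 1)).keys.Nodup :=
        PySem.Dict.nodup_keys_insert _ _ _ hnodup
      have hdis' : (pvDis (pvSeg t b j) : Int) ≤ nd := by
        rw [hseg, pvDis_cons]
        rcases Bool.or_eq_true_iff.mp hg with hin | hsz
        · rw [if_pos ((hmem c).mp hin)]
          exact hdis
        · have hsz' : (cnt.size : Int) < nd := of_decide_eq_true hsz
          rw [pvDictCard hnodup hmem] at hsz'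
          split_ifs
          · exact hdis
          · push_cast
            omega
      obtain ⟨cnt2, b2, heq, hb2, h1, h2, h3, h4, h5⟩ :=
        ih (cnt.insert c (cnt.getD c 0 + 1)) (by omega) hcnt' hmem' hnodup' hdis'
      exact ⟨cnt2, b2, by rw [hstep]; exact heq, by omega, h1, h2, h3, h4, h5⟩
    · -- stop: s[b-1] would bring an unseen character into a full window
      have hstep : pvBScan nd (c :: (t.take b).reverse) cnt (b + 1) = (cnt, b + 1) := by
        simp only [pvBScan]
        rw [if_neg hg]
      rw [hstep]
      refine ⟨cnt, b + 1, rfl, le_rfl, hcnt, hmem, hnodup, hdis, ?_⟩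
      simp only [Bool.or_eq_true, decide_eq_true_eq, not_or] at hg
      have hnotin : ¬ c ∈ pvSeg t (b + 1) j := fun hcin => hg.1 ((hmem c).mpr hcin)
      have hfull : nd ≤ (cnt.size : Int) := by omega
      rw [pvDictCard hnodup hmem] at hfull
      have hd : (pvDis (pvSeg t b j) : Int) = nd + 1 := by
        rw [hseg, pvDis_cons, if_neg hnotin]
        push_cast
        omega
      intro b' hb'
      have hmono : pvDis (pvSeg t b j) ≤ pvDis (pvSeg t b' j) := pvDis_mono t j (by omega)
      omega

lemma pvMain (t : List Char) (k nd : Int) (hk : 1 ≤ k) (hnd : 0 ≤ nd) :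
    ∀ e, e ≤ t.length →
      ∃ (b : Nat) (cnt : PySem.Dict Char Int),
        pvAFold t k nd e
          = ((b : Int), (pvDis (pvSeg t b e) : Int), (pvNok k (pvSeg t b e) : Int), cnt,
             pvBFold t k nd e)
        ∧ b ≤ e
        ∧ (∀ c, cnt.getD c 0 = ((pvSeg t b e).count c : Int))
        ∧ (pvDis (pvSeg t b e) : Int) ≤ nd
        ∧ (∀ b' : Nat, b' < b → nd < (pvDis (pvSeg t b' e) : Int)) := by
  intro e
  induction e with
  | zero =>
    intro _
    refine ⟨0, PySem.Dict.empty, ?_, le_rfl, ?_, ?_, by omega⟩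
    · have h1 : pvBFold t k nd 0 = 0 := by
        have : PySem.List.pyRange 1 (((0 : Nat) : Int) + 1) 1 = [] := by decide
        rw [pvBFold, this]
        rfl
      rw [h1]
      simp [pvAFold, pvSeg_self, pvDis, pvNok]
    · intro c
      rw [PySem.Dict.getD_empty, pvSeg_self]
      simp
    · rw [pvSeg_self]
      simp [pvDis]
      omega
  | succ e ih =>
    intro he1
    have he : e < t.length := by omega
    obtain ⟨b, cnt, hfold, hbe, hcnt, hdis, hmin⟩ := ih (by omega)
    set c := t[e]'he with hc
    have hget : PySem.List.pyGet? t ((e : Nat) : Int) = some c := by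
      rw [PySem.List.pyGet?_natCast, List.getElem?_eq_getElem he]
    set w := pvSeg t b e with hw
    have hseg : pvSeg t b (e + 1) = w ++ [c] := pvSeg_push hbe he
    -- the A-side fold makes one more step
    have hstep : pvAFold t k nd (e + 1) = pvAStep t k nd (pvAFold t k nd e) e := by
      rw [pvAFold, pvAFold, List.range_succ, List.foldl_append]
      rfl
    -- push c into the window state
    have hnewc : cnt.getD c 0 + 1 = ((w ++ [c]).count c : Int) := by
      rw [hcnt c]
      push_cast [count_snoc]
      simp
    have huniq1 : (if cnt.getD c 0 + 1 == 1 then (pvDis w : Int) + 1 else (pvDis w : Int))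
        = (pvDis (w ++ [c]) : Int) := by
      rw [hcnt c, pvDis_snoc]
      by_cases hcw : c ∈ w
      · have h1 : 1 ≤ w.count c := List.one_le_count_iff.mpr hcw
        rw [if_neg (by simp; omega), if_pos hcw]
      · have h0 : w.count c = 0 := List.count_eq_zero.mpr hcw
        rw [if_pos (by simp [h0]), if_neg hcw]
        push_cast
        ring
    have hnok1 : (if cnt.getD c 0 + 1 == k then (pvNok k w : Int) + 1 else (pvNok k w : Int))
        = (pvNok k (w ++ [c]) : Int) := by
      rw [hcnt c, pvNok_snoc hk]
      by_cases hck : ((w.count c : Int)) + 1 = k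
      · rw [if_pos (by simp [hck]), if_pos hck]
        push_cast
        ring
      · rw [if_neg (by simpa using hck), if_neg hck]
    have hcnt1 : ∀ x, (cnt.insert c (cnt.getD c 0 + 1)).getD x 0
        = ((pvSeg t b (e + 1)).count x : Int) := by
      intro x
      rw [PySem.Dict.getD_insert, hseg]
      rcases eq_or_ne x c with rfl | hx
      · rw [if_pos rfl]
        exact hnewc
      · rw [if_neg hx, hcnt x]
        push_cast [count_snoc]
        simp [hx]
    have hmin1 : ∀ b' : Nat, b' < b → nd < (pvDis (pvSeg t b' (e + 1)) : Int) := by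
      intro b' hb'
      have hb'e : b' ≤ e := by omega
      have hsegb' : pvSeg t b' (e + 1) = pvSeg t b' e ++ [c] := pvSeg_push hb'e he
      have hmono : pvDis (pvSeg t b' e) ≤ pvDis (pvSeg t b' (e + 1)) := by
        rw [hsegb', pvDis_snoc]
        split_ifs <;> omega
      have := hmin b' hb'
      omega
    obtain ⟨b2, cnt2, heq2, hb2l, hb2r, hcnt2, hdis2, hmin2⟩ :=
      pvShrink_ok t k nd hk hnd (e + 1) (by omega) (t.length + 1) b
        (cnt.insert c (cnt.getD c 0 + 1)) (by omega) (by omega) hcnt1 hmin1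
    -- the B-side fold makes one more step
    have hBstep : pvBFold t k nd (e + 1) = pvBBody t k nd (pvBFold t k nd e) ((e : Int) + 1) := by
      rw [pvBFold, pvBFold]
      have hcast : (((e + 1 : Nat)) : Int) + 1 = ((e : Int) + 1) + 1 := by push_cast; ring
      rw [hcast, PySem.List.pyRange_one_succ_right (by omega), List.foldl_append]
      rfl
    obtain ⟨cntB, bB, heqB, hbBl, hcntB, hmemB, hnodB, hdisB, hminB⟩ :=
      pvBScan_ok t nd hnd (e + 1) (by omega) (e + 1) PySem.Dict.empty le_rfl
        (by intro x; rw [PySem.Dict.getD_empty, pvSeg_self]; simp)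
        (by intro x; rw [PySem.Dict.contains_empty, pvSeg_self]; simp)
        PySem.Dict.nodup_keys_empty
        (by rw [pvSeg_self]; simp [pvDis]; omega)
    -- the two stopping points coincide
    have hbb : bB = b2 := by
      rcases Nat.lt_trichotomy bB b2 with h | h | h
      · have := hmin2 bB h
        omega
      · exact h
      · have := hminB b2 h
        omega
    rw [hbb] at heqB hcntB hmemB hdisB hminB
    -- assemble
    have hcond : ((pvDis (pvSeg t b2 (e + 1)) : Int) == (pvNok k (pvSeg t b2 (e + 1)) : Int))
        = (cntB.values.all (fun v => decide (k ≤ v))) := by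
      by_cases hP : ∀ x ∈ pvSeg t b2 (e + 1), k ≤ ((pvSeg t b2 (e + 1)).count x : Int)
      · rw [(pvDictAll hnodB hmemB hcntB).mpr hP]
        have := (pvNok_eq_dis_iff k (pvSeg t b2 (e + 1))).mpr hP
        simp [this]
      · have h1 : pvNok k (pvSeg t b2 (e + 1)) ≠ pvDis (pvSeg t b2 (e + 1)) := by
          intro hcontra
          exact hP ((pvNok_eq_dis_iff k _).mp hcontra)
        have h2 : (cntB.values.all (fun v => decide (k ≤ v))) = false := by
          rcases Bool.eq_false_or_eq_true (cntB.values.all (fun v => decide (k ≤ v))) with h | h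
          · exact absurd ((pvDictAll hnodB hmemB hcntB).mp h) hP
          · exact h
        rw [h2]
        simp
        omega
    refine ⟨b2, cnt2, ?_, hb2r, hcnt2, hdis2, hmin2⟩
    rw [hseg] at heq2
    rw [hstep, hfold, pvAStep, hget]
    simp only []
    rw [huniq1, hnok1, heq2, hBstep, pvBBody]
    have htn : ((e : Int) + 1).toNat = e + 1 := by omega
    rw [htn, heqB]
    rw [hcond]

-- ===== VERDICT (by name: the statement is the Claim_ definition above) =====
theorem findLongestDistinct_spec : Claim_equal_findLongestDistinct := by
  intro s k nd _hdom hpre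
  unfold Spec_findLongestDistinct
  rcases hpre with rfl | ⟨hk, hnd⟩
  · have h : ("" : String).toList = [] := rfl
    unfold findLongestDistinct findLongestDistinct_alt
    rw [h]
    have h2 : PySem.List.pyRange 1 ((([] : List Char).length : Int) + 1) 1 = [] := by decide
    rw [h2]
    rfl
  · obtain ⟨b, cnt, hfold, -⟩ := pvMain s.toList k nd hk hnd s.toList.length le_rfl
    show (pvAFold s.toList k nd s.toList.length).2.2.2.2 = pvBFold s.toList k nd s.toList.length
    rw [hfold]
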